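-- pv_equiv track=rewrite | github.com/410773004/parsingAI | compress.py | compress_epm_update_blocks
-- ===== SOURCE A (Python) =====
-- def is_epm_hdr_start(line: str) -> bool:
--     return line == "epm_header_update" or line.startswith("epm_header_update() - epm_header_update")
--
-- def is_epm_hdr_done(line: str) -> bool:
--     return line == "epm_header_update" or line.startswith("epm_header_update() - epm_header_update done")
--
-- def is_epm_sign(line: str) -> bool:
--     return line == "epm_update" or line.startswith("epm_update() - epm_update epm_sign")
--
-- def is_epm_data_done(line: str) -> bool:
--     return line == "epm_update" or line.startswith("epm_update() - epm_data_update done")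
--
-- def compress_epm_update_blocks(lines: list[str]) -> list[str]:
--     out = []
--     i = 0
--     n = len(lines)
--
--     while i < n:
--         if i + 3 < n:
--             l1 = lines[i]
--             l2 = lines[i + 1]
--             l3 = lines[i + 2]
--             l4 = lines[i + 3]
--
--             if (
--                 is_epm_hdr_start(l1)
--                 and is_epm_hdr_done(l2)
--                 and is_epm_sign(l3)
--                 and is_epm_data_done(l4)
--             ):
--                 count = 1
--                 j = i + 4
--
--                 while j + 3 < n:
--                     n1 = lines[j]
--                     n2 = lines[j + 1]
--                     n3 = lines[j + 2]
--                     n4 = lines[j + 3]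
--
--                     if (
--                         is_epm_hdr_start(n1)
--                         and is_epm_hdr_done(n2)
--                         and is_epm_sign(n3)
--                         and is_epm_data_done(n4)
--                     ):
--                         count += 1
--                         j += 4
--                     else:
--                         break
--
--                 if count == 1:
--                     out.extend([l1, l2, l3, l4])
--                 else:
--                     out.append(f"[{count}x epm_update_block]")
--                     out.append("{")
--                     out.append("epm_header_update")
--                     out.append("epm_header_update")
--                     out.append("epm_update")
--                     out.append("epm_update")
--                     out.append("}")
--
--                 i = j
--                 continue
--
--         out.append(lines[i])
--         i += 1
--
--     return out
-- ===== SOURCE B (Python) =====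
-- def is_epm_hdr_start(line: str) -> bool:
--     return line == "epm_header_update" or line.startswith("epm_header_update() - epm_header_update")
--
-- def is_epm_hdr_done(line: str) -> bool:
--     return line == "epm_header_update" or line.startswith("epm_header_update() - epm_header_update done")
--
-- def is_epm_sign(line: str) -> bool:
--     return line == "epm_update" or line.startswith("epm_update() - epm_update epm_sign")
--
-- def is_epm_data_done(line: str) -> bool:
--     return line == "epm_update" or line.startswith("epm_update() - epm_data_update done")
--
-- def compress_epm_update_blocks(lines: list[str]) -> list[str]:
--     n = len(lines)
--     # Pass 1 (lexer): turn the line list into a token stream; a 4-line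
--     # epm_update block becomes one block token carrying its lines, any
--     # other line becomes a plain token.
--     toks = []
--     i = 0
--     while i < n:
--         if (i + 3 < n
--                 and is_epm_hdr_start(lines[i])
--                 and is_epm_hdr_done(lines[i + 1])
--                 and is_epm_sign(lines[i + 2])
--                 and is_epm_data_done(lines[i + 3])):
--             toks.append((True, lines[i:i + 4]))
--             i += 4
--         else:
--             toks.append((False, [lines[i]]))
--             i += 1
--     # Pass 2 (run-length fold): fold over the token stream, run-length
--     # encoding maximal runs of block tokens; a run of one block renders as
--     # its original four lines, a longer run as the 7-line summary.
--     out = []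
--     run = []     # the lines of the first block of the current run
--     count = 0    # length of the current run of block tokens
--     def flush():
--         nonlocal run, count
--         if count == 1:
--             out.extend(run)
--         elif count > 1:
--             out.append(f"[{count}x epm_update_block]")
--             out.extend(["{", "epm_header_update", "epm_header_update",
--                         "epm_update", "epm_update", "}"])
--         run = []
--         count = 0
--     for is_block, ls in toks:
--         if is_block:
--             if count == 0:
--                 run = ls
--             count += 1
--         else:
--             flush()
--             out.extend(ls)
--     flush()
--     return out
-- ===== Notes on version B (the rewrite author's own statement) =====
-- stated objective: alternative
-- what changed: B replaces A's single pass with nested condition-testing while-loops by a lexer pass that turns the line list into a token stream (block tokens carrying their four lines, plain line tokens) followed by a run-length-encoding fold over that stream that renders a run of one block token as its literal lines and a longer run as the 7-line summary.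
import Mathlib
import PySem

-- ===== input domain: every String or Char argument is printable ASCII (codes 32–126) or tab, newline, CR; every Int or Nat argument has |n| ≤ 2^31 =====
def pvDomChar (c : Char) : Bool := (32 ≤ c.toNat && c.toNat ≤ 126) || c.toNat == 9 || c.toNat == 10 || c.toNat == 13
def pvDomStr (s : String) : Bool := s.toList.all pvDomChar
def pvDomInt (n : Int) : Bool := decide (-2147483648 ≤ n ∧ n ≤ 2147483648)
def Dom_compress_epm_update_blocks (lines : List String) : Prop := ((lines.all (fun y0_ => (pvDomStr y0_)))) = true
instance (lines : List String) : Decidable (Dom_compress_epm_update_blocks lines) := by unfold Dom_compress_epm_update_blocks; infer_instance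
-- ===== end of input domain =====

-- B replaces A's nested while-loops by two staged passes — a lexer producing a token stream (block tokens / line tokens) and a run-length-encoding fold over that stream; objective: alternative decomposition, same cost.


-- ===== PORT A =====
def is_epm_hdr_start (line : String) : Bool :=
  line == "epm_header_update" || PySem.Str.startswith line "epm_header_update() - epm_header_update"

def is_epm_hdr_done (line : String) : Bool :=
  line == "epm_header_update" || PySem.Str.startswith line "epm_header_update() - epm_header_update done"

def is_epm_sign (line : String) : Bool :=
  line == "epm_update" || PySem.Str.startswith line "epm_update() - epm_update epm_sign"

def is_epm_data_done (line : String) : Bool :=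
  line == "epm_update" || PySem.Str.startswith line "epm_update() - epm_data_update done"

-- A's inner while loop: returns (count, j). Indices stay in range (guard j+3 < n), so getD is
-- exact. The fuel argument only makes the recursion structural; started at n it never runs out
-- (j grows by 4 while j+3 < n).
def aInner (lines : List String) (n : Nat) : Nat → Nat → Nat → Nat × Nat
  | 0, j, count => (count, j)
  | fuel+1, j, count =>
    if j + 3 < n then
      if is_epm_hdr_start (lines.getD j "") && is_epm_hdr_done (lines.getD (j+1) "")
         && is_epm_sign (lines.getD (j+2) "") && is_epm_data_done (lines.getD (j+3) "") then
        aInner lines n fuel (j+4) (count+1)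
      else (count, j)
    else (count, j)

-- A's outer while loop; fuel n+1 suffices (i strictly increases up to n)
def aLoop (lines : List String) (n : Nat) : Nat → Nat → List String → List String
  | 0, _, out => out
  | fuel+1, i, out =>
    if i < n then
      if i + 3 < n then
        let l1 := lines.getD i ""
        let l2 := lines.getD (i+1) ""
        let l3 := lines.getD (i+2) ""
        let l4 := lines.getD (i+3) ""
        if is_epm_hdr_start l1 && is_epm_hdr_done l2 && is_epm_sign l3 && is_epm_data_done l4 then
          let cj := aInner lines n n (i+4) 1
          let out' :=
            if cj.1 == 1 then out ++ [l1, l2, l3, l4]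
            else out ++ ["[" ++ toString cj.1 ++ "x epm_update_block]", "{",
                         "epm_header_update", "epm_header_update", "epm_update", "epm_update", "}"]
          aLoop lines n fuel cj.2 out'
        else aLoop lines n fuel (i+1) (out ++ [lines.getD i ""])
      else aLoop lines n fuel (i+1) (out ++ [lines.getD i ""])
    else out

def compress_epm_update_blocks (lines : List String) : List String :=
  aLoop lines lines.length (lines.length + 1) 0 []

-- ===== PORT B =====
-- pass 1 (lexer): the token stream; each token consumes ≥ 1 line, so fuel n+1 suffices
def bTok (lines : List String) (n : Nat) : Nat → Nat → List (Bool × List String)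
  | 0, _ => []
  | fuel+1, i =>
    if i < n then
      if i + 3 < n
         && (is_epm_hdr_start (lines.getD i "") && is_epm_hdr_done (lines.getD (i+1) "")
             && is_epm_sign (lines.getD (i+2) "") && is_epm_data_done (lines.getD (i+3) "")) then
        (true, PySem.List.slice lines (some (i : Int)) (some ((i : Int) + 4))) :: bTok lines n fuel (i+4)
      else
        (false, [lines.getD i ""]) :: bTok lines n fuel (i+1)
    else []

-- Source B's flush(): render the pending run of block tokens
def flushRender (count : Nat) (run : List String) : List String :=
  if count == 1 then run
  else if 1 < count then
    ["[" ++ toString count ++ "x epm_update_block]", "{",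
     "epm_header_update", "epm_header_update", "epm_update", "epm_update", "}"]
  else []

-- pass 2: run-length fold over the token stream (state: out, pending run, run count)
def bMerge : List (Bool × List String) → List String → List String → Nat → List String
  | [], out, run, count => out ++ flushRender count run
  | (true, ls) :: toks, out, run, count =>
      if count == 0 then bMerge toks out ls 1 else bMerge toks out run (count+1)
  | (false, ls) :: toks, out, run, count =>
      bMerge toks (out ++ flushRender count run ++ ls) [] 0

def compress_epm_update_blocks_alt (lines : List String) : List String :=
  bMerge (bTok lines lines.length (lines.length + 1) 0) [] [] 0

-- ===== PRECONDITION & SPEC =====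
def Spec_compress_epm_update_blocks (lines : List String) (out : List String) : Prop := out = compress_epm_update_blocks_alt lines
instance (lines : List String) (out : List String) : Decidable (Spec_compress_epm_update_blocks lines out) := by unfold Spec_compress_epm_update_blocks; infer_instance

-- ===== CLAIM (what is proved, stated in full; the proofs are below) =====
def Claim_equal_compress_epm_update_blocks : Prop := ∀ (lines : List String), Dom_compress_epm_update_blocks lines → Spec_compress_epm_update_blocks lines (compress_epm_update_blocks lines)

-- ===== LEMMAS AND PROOFS =====

-- abbreviation used only in the proofs: A's/B's four-line condition at position i
def conds (lines : List String) (i : Nat) : Bool :=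
  is_epm_hdr_start (lines.getD i "") && is_epm_hdr_done (lines.getD (i+1) "")
    && is_epm_sign (lines.getD (i+2) "") && is_epm_data_done (lines.getD (i+3) "")

-- step lemmas unfolding one iteration of each fuel recursion

theorem aInner_stop (lines : List String) (n j count : Nat) (h3 : ¬ j + 3 < n) :
    ∀ fuel, aInner lines n fuel j count = (count, j) := by
  intro fuel
  cases fuel with
  | zero => rfl
  | succ f => rw [aInner, if_neg h3]

theorem aInner_step (lines : List String) (n fuel j count : Nat) (h3 : j + 3 < n)
    (hc : conds lines j = true) :
    aInner lines n (fuel+1) j count = aInner lines n fuel (j+4) (count+1) := by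
  simp only [conds] at hc
  rw [aInner, if_pos h3, if_pos hc]

theorem aInner_stop2 (lines : List String) (n j count : Nat) (h3 : j + 3 < n)
    (hc : conds lines j = false) :
    ∀ fuel, aInner lines n fuel j count = (count, j) := by
  intro fuel
  cases fuel with
  | zero => rfl
  | succ f =>
    rw [aInner, if_pos h3, if_neg (by rw [show (is_epm_hdr_start (lines.getD j "")
      && is_epm_hdr_done (lines.getD (j+1) "") && is_epm_sign (lines.getD (j+2) "")
      && is_epm_data_done (lines.getD (j+3) "")) = conds lines j from rfl, hc]; simp)]

theorem aLoop_stop (lines : List String) (n fuel i : Nat) (out : List String) (h : ¬ i < n) :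
    aLoop lines n (fuel+1) i out = out := by
  rw [aLoop, if_neg h]

theorem aLoop_step_block (lines : List String) (n fuel i : Nat) (out : List String)
    (hi : i < n) (h3 : i + 3 < n) (hc : conds lines i = true) :
    aLoop lines n (fuel+1) i out =
      aLoop lines n fuel (aInner lines n n (i+4) 1).2
        (if (aInner lines n n (i+4) 1).1 == 1 then
           out ++ [lines.getD i "", lines.getD (i+1) "", lines.getD (i+2) "", lines.getD (i+3) ""]
         else
           out ++ ["[" ++ toString (aInner lines n n (i+4) 1).1 ++ "x epm_update_block]", "{",
                   "epm_header_update", "epm_header_update", "epm_update", "epm_update", "}"]) := by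
  simp only [conds] at hc
  simp only [aLoop]
  rw [if_pos hi, if_pos h3, if_pos hc]

theorem aLoop_step_far (lines : List String) (n fuel i : Nat) (out : List String)
    (hi : i < n) (h3 : ¬ i + 3 < n) :
    aLoop lines n (fuel+1) i out = aLoop lines n fuel (i+1) (out ++ [lines.getD i ""]) := by
  simp only [aLoop]
  rw [if_pos hi, if_neg h3]

theorem aLoop_step_nocond (lines : List String) (n fuel i : Nat) (out : List String)
    (hi : i < n) (h3 : i + 3 < n) (hc : conds lines i = false) :
    aLoop lines n (fuel+1) i out = aLoop lines n fuel (i+1) (out ++ [lines.getD i ""]) := by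
  simp only [aLoop]
  rw [if_pos hi, if_pos h3, if_neg (by rw [show (is_epm_hdr_start (lines.getD i "")
    && is_epm_hdr_done (lines.getD (i+1) "") && is_epm_sign (lines.getD (i+2) "")
    && is_epm_data_done (lines.getD (i+3) "")) = conds lines i from rfl, hc]; simp)]

theorem bTok_stop (lines : List String) (n fuel i : Nat) (h : ¬ i < n) :
    bTok lines n (fuel+1) i = [] := by
  rw [bTok, if_neg h]

theorem bTok_cons_true (lines : List String) (n fuel i : Nat) (hi : i < n)
    (h3 : i + 3 < n) (hc : conds lines i = true) :
    bTok lines n (fuel+1) i =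
      (true, PySem.List.slice lines (some (i : Int)) (some ((i : Int) + 4))) :: bTok lines n fuel (i+4) := by
  rw [bTok, if_pos hi, if_pos (by rw [Bool.and_eq_true]; exact ⟨decide_eq_true h3, hc⟩)]

theorem bTok_cons_false (lines : List String) (n fuel i : Nat) (hi : i < n)
    (hb : ¬ (i + 3 < n ∧ conds lines i = true)) :
    bTok lines n (fuel+1) i = (false, [lines.getD i ""]) :: bTok lines n fuel (i+1) := by
  rw [bTok, if_pos hi, if_neg (fun h => by
    rw [Bool.and_eq_true] at h
    exact hb ⟨of_decide_eq_true h.1, h.2⟩)]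

theorem bMerge_true_zero (ls : List String) (toks : List (Bool × List String)) (out run : List String) :
    bMerge ((true, ls) :: toks) out run 0 = bMerge toks out ls 1 := by
  simp [bMerge]

theorem bMerge_true_pos (ls : List String) (toks : List (Bool × List String)) (out run : List String)
    (count : Nat) (hc : 1 ≤ count) :
    bMerge ((true, ls) :: toks) out run count = bMerge toks out run (count+1) := by
  have : (count == 0) = false := by simp; omega
  simp [bMerge, this]

theorem aInner_ge (lines : List String) (n : Nat) :
    ∀ fuel j count, j ≤ (aInner lines n fuel j count).2 := by
  intro fuel
  induction fuel with
  | zero => intro j count; simp [aInner]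
  | succ fuel ih =>
    intro j count
    by_cases h3 : j + 3 < n
    · cases hc : conds lines j with
      | true => rw [aInner_step lines n fuel j count h3 hc]
                exact le_trans (by omega) (ih (j+4) (count+1))
      | false => rw [aInner_stop2 lines n j count h3 hc]
    · rw [aInner_stop lines n j count h3]

theorem aInner_count_ge (lines : List String) (n : Nat) :
    ∀ fuel j count, count ≤ (aInner lines n fuel j count).1 := by
  intro fuel
  induction fuel with
  | zero => intro j count; simp [aInner]
  | succ fuel ih =>
    intro j count
    by_cases h3 : j + 3 < n
    · cases hc : conds lines j with
      | true => rw [aInner_step lines n fuel j count h3 hc]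
                exact le_trans (by omega) (ih (j+4) (count+1))
      | false => rw [aInner_stop2 lines n j count h3 hc]
    · rw [aInner_stop lines n j count h3]

-- aInner's result does not depend on the fuel once the fuel is at least n - j
theorem aInner_fuel (lines : List String) (n : Nat) :
    ∀ f g j count, n ≤ j + f → n ≤ j + g →
      aInner lines n f j count = aInner lines n g j count := by
  intro f
  induction f with
  | zero =>
    intro g j count hf hg
    have h3 : ¬ (j + 3 < n) := by omega
    rw [aInner_stop lines n j count h3, aInner_stop lines n j count h3]
  | succ f ih =>
    intro g j count hf hg
    by_cases h3 : j + 3 < n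
    · have hg' : ∃ g', g = g' + 1 := ⟨g - 1, by omega⟩
      obtain ⟨g', rfl⟩ := hg'
      cases hc : conds lines j with
      | true =>
        rw [aInner_step lines n f j count h3 hc, aInner_step lines n g' j count h3 hc]
        exact ih g' (j+4) (count+1) (by omega) (by omega)
      | false =>
        rw [aInner_stop2 lines n j count h3 hc, aInner_stop2 lines n j count h3 hc]
    · rw [aInner_stop lines n j count h3, aInner_stop lines n j count h3]

-- aLoop's result does not depend on the fuel once the fuel is at least n - i
theorem aLoop_fuel (lines : List String) (n : Nat) :
    ∀ f g i out, n ≤ i + f → n ≤ i + g →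
      aLoop lines n f i out = aLoop lines n g i out := by
  intro f
  induction f with
  | zero =>
    intro g i out hf hg
    have hi : ¬ (i < n) := by omega
    cases g with
    | zero => rfl
    | succ g => rw [aLoop_stop lines n g i out hi]; rfl
  | succ f ih =>
    intro g i out hf hg
    by_cases hi : i < n
    · have hg' : ∃ g', g = g' + 1 := ⟨g - 1, by omega⟩
      obtain ⟨g', rfl⟩ := hg'
      by_cases h3 : i + 3 < n
      · cases hc : conds lines i with
        | true =>
          rw [aLoop_step_block lines n f i out hi h3 hc,
              aLoop_step_block lines n g' i out hi h3 hc]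
          have hge : i + 4 ≤ (aInner lines n n (i+4) 1).2 := aInner_ge lines n n (i+4) 1
          exact ih g' _ _ (by omega) (by omega)
        | false =>
          rw [aLoop_step_nocond lines n f i out hi h3 hc,
              aLoop_step_nocond lines n g' i out hi h3 hc]
          exact ih g' _ _ (by omega) (by omega)
      · rw [aLoop_step_far lines n f i out hi h3, aLoop_step_far lines n g' i out hi h3]
        exact ih g' _ _ (by omega) (by omega)
    · cases g with
      | zero => rw [aLoop_stop lines n f i out hi]; rfl
      | succ g => rw [aLoop_stop lines n f i out hi, aLoop_stop lines n g i out hi]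

-- the four literal lines are the slice lines[i:i+4] when i+3 < length
theorem take4_getD (lines : List String) (i : Nat) (h : i + 3 < lines.length) :
    PySem.List.slice lines (some (i : Int)) (some ((i : Int) + 4)) =
      [lines.getD i "", lines.getD (i+1) "", lines.getD (i+2) "", lines.getD (i+3) ""] := by
  rw [show ((i : Int) + 4) = ((i : Int) + ((4 : Nat) : Int)) by norm_num,
     PySem.List.slice_natCast_add]
  apply List.ext_getElem
  · simp; omega
  · intro k h1 h2
    simp only [List.length_take, List.length_drop] at h1
    rw [List.getElem_take, List.getElem_drop]
    simp only [List.length_cons, List.length_nil] at h2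
    interval_cases k <;> simp <;> rw [List.getElem?_eq_getElem (by omega)] <;> rfl

-- the joint induction: B's run-length fold over the token stream simulates A's outer loop
-- (first component) and, inside a run of block tokens, A's inner counting loop (second)
theorem joint (lines : List String) :
    ∀ fuel,
      (∀ i out, lines.length ≤ i + fuel →
        bMerge (bTok lines lines.length fuel i) out [] 0
          = aLoop lines lines.length (lines.length + 1) i out)
      ∧ (∀ j out run count, lines.length ≤ j + fuel → 1 ≤ count →
        bMerge (bTok lines lines.length fuel j) out run count
          = aLoop lines lines.length (lines.length + 1)
              (aInner lines lines.length lines.length j count).2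
              (out ++ flushRender (aInner lines lines.length lines.length j count).1 run)) := by
  intro fuel
  induction fuel with
  | zero =>
    constructor
    · intro i out hf
      have hi : ¬ (i < lines.length) := by omega
      rw [show bTok lines lines.length 0 i = [] from rfl,
          aLoop_stop lines lines.length lines.length i out hi]
      simp [bMerge, flushRender]
    · intro j out run count hf hc
      have hj : ¬ (j < lines.length) := by omega
      have h3 : ¬ (j + 3 < lines.length) := by omega
      rw [show bTok lines lines.length 0 j = [] from rfl,
          aInner_stop lines lines.length j count h3,
          aLoop_stop lines lines.length lines.length j _ hj]
      rfl
  | succ fuel ih =>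
    constructor
    · -- simulate A's outer loop from a fresh (count = 0) state
      intro i out hf
      by_cases hi : i < lines.length
      · by_cases h3 : i + 3 < lines.length
        · cases hc : conds lines i with
          | true =>
            rw [bTok_cons_true lines lines.length fuel i hi h3 hc, bMerge_true_zero,
                ih.2 (i+4) out _ 1 (by omega) le_rfl,
                aLoop_step_block lines lines.length lines.length i out hi h3 hc]
            have hc1 : 1 ≤ (aInner lines lines.length lines.length (i+4) 1).1 :=
              aInner_count_ge lines lines.length lines.length (i+4) 1
            have hge : i + 4 ≤ (aInner lines lines.length lines.length (i+4) 1).2 :=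
              aInner_ge lines lines.length lines.length (i+4) 1
            rw [aLoop_fuel lines lines.length lines.length (lines.length + 1) _ _ (by omega) (by omega)]
            congr 1
            by_cases h1 : (aInner lines lines.length lines.length (i+4) 1).1 = 1
            · simp [flushRender, h1, take4_getD lines i h3]
            · have h2 : 1 < (aInner lines lines.length lines.length (i+4) 1).1 := by omega
              have hbe : ((aInner lines lines.length lines.length (i+4) 1).1 == 1) = false := by
                simp [h1]
              simp [flushRender, hbe, h2]
          | false =>
            rw [bTok_cons_false lines lines.length fuel i hi (by simp [hc]),
                show bMerge ((false, [lines.getD i ""]) :: bTok lines lines.length fuel (i+1))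
                    out [] 0
                  = bMerge (bTok lines lines.length fuel (i+1))
                      (out ++ flushRender 0 [] ++ [lines.getD i ""]) [] 0 from rfl,
                show flushRender 0 ([] : List String) = [] from rfl, List.append_nil,
                ih.1 (i+1) (out ++ [lines.getD i ""]) (by omega),
                aLoop_step_nocond lines lines.length lines.length i out hi h3 hc,
                aLoop_fuel lines lines.length lines.length (lines.length + 1) _ _ (by omega) (by omega)]
        · rw [bTok_cons_false lines lines.length fuel i hi (by tauto),
              show bMerge ((false, [lines.getD i ""]) :: bTok lines lines.length fuel (i+1))
                  out [] 0
                = bMerge (bTok lines lines.length fuel (i+1))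
                    (out ++ flushRender 0 [] ++ [lines.getD i ""]) [] 0 from rfl,
              show flushRender 0 ([] : List String) = [] from rfl, List.append_nil,
              ih.1 (i+1) (out ++ [lines.getD i ""]) (by omega),
              aLoop_step_far lines lines.length lines.length i out hi h3,
              aLoop_fuel lines lines.length lines.length (lines.length + 1) _ _ (by omega) (by omega)]
      · rw [bTok_stop lines lines.length fuel i hi,
            aLoop_stop lines lines.length lines.length i out hi]
        simp [bMerge, flushRender]
    · -- simulate A's inner counting loop inside a run of block tokens
      intro j out run count hf hcnt
      by_cases hj : j < lines.length
      · by_cases h3 : j + 3 < lines.length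
        · cases hc : conds lines j with
          | true =>
            rw [bTok_cons_true lines lines.length fuel j hj h3 hc,
                bMerge_true_pos _ _ _ _ count hcnt,
                show aInner lines lines.length lines.length j count
                  = aInner lines lines.length lines.length (j+4) (count+1) from by
                  rw [aInner_fuel lines lines.length lines.length (lines.length + 1) j count
                        (by omega) (by omega),
                      aInner_step lines lines.length lines.length j count h3 hc]]
            exact ih.2 (j+4) out run (count+1) (by omega) (by omega)
          | false =>
            rw [bTok_cons_false lines lines.length fuel j hj (by simp [hc]),
                show bMerge ((false, [lines.getD j ""]) :: bTok lines lines.length fuel (j+1))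
                    out run count
                  = bMerge (bTok lines lines.length fuel (j+1))
                      (out ++ flushRender count run ++ [lines.getD j ""]) [] 0 from rfl,
                ih.1 (j+1) (out ++ flushRender count run ++ [lines.getD j ""]) (by omega),
                aInner_stop2 lines lines.length j count h3 hc _]
            rw [aLoop_step_nocond lines lines.length lines.length j
                  (out ++ flushRender count run) hj h3 hc,
                aLoop_fuel lines lines.length lines.length (lines.length + 1) _ _ (by omega) (by omega)]
        · rw [bTok_cons_false lines lines.length fuel j hj (by tauto),
              show bMerge ((false, [lines.getD j ""]) :: bTok lines lines.length fuel (j+1))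
                  out run count
                = bMerge (bTok lines lines.length fuel (j+1))
                    (out ++ flushRender count run ++ [lines.getD j ""]) [] 0 from rfl,
              ih.1 (j+1) (out ++ flushRender count run ++ [lines.getD j ""]) (by omega),
              aInner_stop lines lines.length j count h3]
          rw [aLoop_step_far lines lines.length lines.length j
                (out ++ flushRender count run) hj h3,
              aLoop_fuel lines lines.length lines.length (lines.length + 1) _ _ (by omega) (by omega)]
      · have h3 : ¬ (j + 3 < lines.length) := by omega
        rw [bTok_stop lines lines.length fuel j hj,
            aInner_stop lines lines.length j count h3,
            aLoop_stop lines lines.length lines.length j _ hj]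
        rfl

-- ===== VERDICT (by name: the statement is the Claim_ definition above) =====
theorem compress_epm_update_blocks_spec : Claim_equal_compress_epm_update_blocks := by
  intro lines _
  unfold Spec_compress_epm_update_blocks compress_epm_update_blocks compress_epm_update_blocks_alt
  exact ((joint lines (lines.length + 1)).1 0 [] (by omega)).symm
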